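-- pv_equiv track=rewrite | github.com/scodebox/cp | matrix/python3/10_common_elements_in_all_rows.py | solution
-- ===== SOURCE A (Python) =====
-- def solution(matrix):
--     # all first row element will be keys in the dict
--     count = dict()
--     for item in matrix[0]:
--         count[item] = 1
--
--     # key increment when that element is repeated
--     for row in range(1, len(matrix)):
--         for item in matrix[row]:
--             if item in count and count[item] < row+1:
--                 count[item] += 1
--
--     # return key count == No of rows in matrix
--     result = []
--     for key in count.keys():
--         if count[key] == len(matrix):
--             result.append(key)
--
--     return result
-- ===== SOURCE B (Python) =====
-- def solution(matrix):
--     common = set(matrix[0])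
--     for row in matrix[1:]:
--         common &= set(row)
--     return [x for x in dict.fromkeys(matrix[0]) if x in common]
-- ===== Notes on version B (the rewrite author's own statement) =====
-- stated objective: idiomatic
-- what changed: Replaced A's dict of per-row capped count increments (and the count==len(matrix) filter) with a running set intersection over the rows, finally filtering the first row's distinct elements in order.
-- intended difference: On matrices where a first-row element is missing from some later row but duplicate occurrences of it in other later rows push A's capped counter up to len(matrix), A wrongly reports it as common to all rows (e.g. A([[1],[2],[1,1]]) == [1]) while B omits it ([]), which is the intended 'elements common to all rows'. — e.g. on solution([[1], [2], [1, 1]]): A returns [1], B returns []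
import Mathlib
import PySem

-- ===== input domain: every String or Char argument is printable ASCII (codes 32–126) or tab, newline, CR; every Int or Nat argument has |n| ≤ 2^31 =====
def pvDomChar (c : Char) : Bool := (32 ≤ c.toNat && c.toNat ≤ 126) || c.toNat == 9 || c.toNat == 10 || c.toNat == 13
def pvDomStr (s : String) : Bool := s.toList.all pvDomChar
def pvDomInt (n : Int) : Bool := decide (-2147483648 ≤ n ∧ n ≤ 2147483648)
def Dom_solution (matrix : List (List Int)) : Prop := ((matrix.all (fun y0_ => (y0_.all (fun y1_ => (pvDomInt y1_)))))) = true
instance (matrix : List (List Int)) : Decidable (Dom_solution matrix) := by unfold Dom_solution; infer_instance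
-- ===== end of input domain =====

-- B replaces A's per-row capped count increments with a running set intersection
-- followed by an ordered filter of the first row's distinct elements (objective: idiomatic).
-- On rows beyond the first that contain duplicates A can silently miscount (see D_ below).

-- ===== PORT A =====
-- body of A's inner 'for item in matrix[row]' loop
def aInner (row : Int) (d : PySem.Dict Int Int) (item : Int) : PySem.Dict Int Int :=
  match d.get? item with
  | some c => if c < row + 1 then d.insert item (c + 1) else d
  | none => d

-- body of A's 'for row in range(1, len(matrix))' loop
def aOuter (matrix : List (List Int)) (d : PySem.Dict Int Int) (row : Int) : PySem.Dict Int Int :=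
  ((PySem.List.pyGet? matrix row).getD []).foldl (aInner row) d

def solution (matrix : List (List Int)) : List Int :=
  let count := ((PySem.List.pyGet? matrix 0).getD []).foldl
    (fun d item => d.insert item 1) (PySem.Dict.empty : PySem.Dict Int Int)
  let count2 := (PySem.List.pyRange 1 (matrix.length : Int) 1).foldl (aOuter matrix) count
  count2.keys.foldl (fun result key =>
    if (count2.get? key).getD 0 = (matrix.length : Int) then result ++ [key] else result) []

-- ===== PORT B =====
def solution_alt (matrix : List (List Int)) : List Int :=
  let first := (PySem.List.pyGet? matrix 0).getD []
  let common : PySem.Set Int := PySem.Set.ofList first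
  let common := (PySem.List.slice matrix (some 1) none).foldl
    (fun c row => PySem.Set.inter c (PySem.Set.ofList row)) common
  (PySem.List.dedup first).filter (fun x => PySem.Set.contains common x)

-- ===== PRECONDITION & SPEC =====
-- A evaluates matrix[0], which raises IndexError on the empty matrix; Pre_ excludes only that.
def Pre_solution (matrix : List (List Int)) : Prop := matrix ≠ []
instance (matrix : List (List Int)) : Decidable (Pre_solution matrix) := by unfold Pre_solution; infer_instance
def pvWitness_solution : List (List Int) := [[1]]

-- closed-form recurrence on per-row occurrence counts: the value A's capped counter reaches for x
def aCnt (x : Int) : List (List Int) → Int → Int → Int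
  | [], _, c => c
  | row :: rows, r, c => aCnt x rows (r + 1) (min (c + (row.count x : Int)) (max c (r + 1)))

-- On matrices where some first-row element x is missing from a later row but duplicate
-- occurrences of x in other later rows make its capped count still reach len(matrix),
-- A wrongly returns x among the common elements while B omits it; B's value is the
-- intended 'elements common to all rows'.
def D_solution (matrix : List (List Int)) : Prop :=
  ∃ x ∈ matrix.headD [],
    ¬ (aCnt x matrix.tail 1 1 = (matrix.length : Int) ↔ ∀ row ∈ matrix.tail, x ∈ row)
instance (matrix : List (List Int)) : Decidable (D_solution matrix) := by unfold D_solution; infer_instance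

def Spec_solution (matrix : List (List Int)) (out : List Int) : Prop :=
  ¬ D_solution matrix → out = solution_alt matrix
instance (matrix : List (List Int)) (out : List Int) : Decidable (Spec_solution matrix out) := by
  unfold Spec_solution; infer_instance

def pvDiffWitness_solution : List (List Int) := [[1], [2], [1, 1]]
def pvDiffWitnessOut_solution : (List Int) × (List Int) := ([1], [])

-- ===== CLAIM (what is proved, stated in full; the proofs are below) =====
def Claim_unchanged_solution : Prop := ∀ (matrix : List (List Int)), Dom_solution matrix → Pre_solution matrix → Spec_solution matrix (solution matrix)
def Claim_changed_solution : Prop := Dom_solution (pvDiffWitness_solution) ∧ Pre_solution (pvDiffWitness_solution) ∧ D_solution (pvDiffWitness_solution) ∧ solution (pvDiffWitness_solution) = pvDiffWitnessOut_solution.1 ∧ solution_alt (pvDiffWitness_solution) = pvDiffWitnessOut_solution.2 ∧ pvDiffWitnessOut_solution.1 ≠ pvDiffWitnessOut_solution.2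
def Claim_exact_solution : Prop := ∀ (matrix : List (List Int)), Dom_solution matrix → Pre_solution matrix → D_solution matrix → solution matrix ≠ solution_alt matrix

-- ===== LEMMAS AND PROOFS =====

-- phase-1 dict: every first-row element mapped to 1
theorem get?_foldl_insert_one (l : List Int) (d : PySem.Dict Int Int) (x : Int) :
    (l.foldl (fun d i => d.insert i 1) d).get? x = if x ∈ l then some 1 else d.get? x := by
  induction l generalizing d with
  | nil => simp
  | cons a l ih =>
    rw [List.foldl_cons, ih]
    by_cases hl : x ∈ l
    · simp [hl]
    · by_cases hxa : x = a <;>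
        simp [hl, hxa, PySem.Dict.get?_insert]

-- the inner loop caps each element's count at row+1
theorem inner_get? (row : List Int) (r : Int) (d : PySem.Dict Int Int) (x : Int) :
    (row.foldl (aInner r) d).get? x
      = (d.get? x).map (fun c => min (c + (row.count x : Int)) (max c (r + 1))) := by
  induction row generalizing d with
  | nil =>
    cases hd : d.get? x with
    | none => simp [hd]
    | some c => simp [hd]
  | cons a row ih =>
    rw [List.foldl_cons, ih]
    by_cases hxa : x = a
    · subst hxa
      cases hd : d.get? x with
      | none => simp [aInner, hd]
      | some c =>
        by_cases hc : c < r + 1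
        · simp [aInner, hd, hc, PySem.Dict.get?_insert_self]
          omega
        · simp [aInner, hd, hc]
          have : (0 : Int) ≤ (row.count x : Int) := Int.natCast_nonneg _
          omega
    · have hcnt : (a :: row).count x = row.count x := by
        simp [List.count_cons]
        omega
      have hget : (aInner r d a).get? x = d.get? x := by
        unfold aInner
        cases hd : d.get? a with
        | none => rfl
        | some c =>
          by_cases hc : c < r + 1
          · simp [hc, PySem.Dict.get?_insert, hxa]
          · simp [hc]
      rw [hget, hcnt]

theorem aInner_keys (r : Int) (d : PySem.Dict Int Int) (item : Int) :
    (aInner r d item).keys = d.keys := by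
  unfold aInner
  cases hd : d.get? item with
  | none => rfl
  | some c =>
    by_cases hc : c < r + 1
    · have hcon : d.contains item = true := by
        rw [PySem.Dict.contains_eq_isSome_get?, hd]; rfl
      simp [hc, PySem.Dict.keys_insert_of_contains _ _ hcon]
    · simp [hc]

theorem inner_keys (row : List Int) (r : Int) (d : PySem.Dict Int Int) :
    (row.foldl (aInner r) d).keys = d.keys := by
  induction row generalizing d with
  | nil => rfl
  | cons a row ih => rw [List.foldl_cons, ih, aInner_keys]

-- structural form of A's outer loop
def outerRec : List (List Int) → Int → PySem.Dict Int Int → PySem.Dict Int Int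
  | [], _, d => d
  | row :: rows, r, d => outerRec rows (r + 1) (row.foldl (aInner r) d)

theorem outer_to_rec (matrix : List (List Int)) (r : Nat) (d : PySem.Dict Int Int) :
    (PySem.List.pyRange (r : Int) (matrix.length : Int) 1).foldl (aOuter matrix) d
      = outerRec (matrix.drop r) (r : Int) d := by
  by_cases hlt : r < matrix.length
  · rw [PySem.List.pyRange_one_cons (by exact_mod_cast hlt), List.foldl_cons,
      List.drop_eq_getElem_cons hlt]
    have hstep : aOuter matrix d (r : Int) = matrix[r].foldl (aInner (r : Int)) d := by
      unfold aOuter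
      rw [PySem.List.pyGet?_natCast]
      simp [List.getElem?_eq_getElem hlt]
    have hcast : ((r : Int) + 1) = ((r + 1 : Nat) : Int) := by push_cast; ring
    rw [hstep, hcast, outer_to_rec matrix (r + 1) (matrix[r].foldl (aInner (r : Int)) d)]
    show outerRec _ _ _ = outerRec (matrix[r] :: matrix.drop (r + 1)) (r : Int) d
    rw [outerRec]
    rw [hcast]
  · rw [PySem.List.pyRange_one_eq_nil (by exact_mod_cast Nat.le_of_not_lt hlt),
      List.drop_eq_nil_of_le (Nat.le_of_not_lt hlt)]
    rfl
termination_by matrix.length - r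

theorem outerRec_get? (rows : List (List Int)) (r : Int) (d : PySem.Dict Int Int) (x : Int) :
    (outerRec rows r d).get? x = (d.get? x).map (fun c => aCnt x rows r c) := by
  induction rows generalizing r d with
  | nil => cases hd : d.get? x <;> simp [outerRec, aCnt, hd]
  | cons row rows ih =>
    rw [outerRec, ih, inner_get?]
    cases hd : d.get? x <;> simp [aCnt]

theorem outerRec_keys (rows : List (List Int)) (r : Int) (d : PySem.Dict Int Int) :
    (outerRec rows r d).keys = d.keys := by
  induction rows generalizing r d with
  | nil => rfl
  | cons row rows ih => rw [outerRec, ih, inner_keys]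

-- characterisation of A on a nonempty matrix
theorem solution_eq_filter (first : List Int) (rows : List (List Int)) :
    solution (first :: rows)
      = (PySem.List.dedup first).filter
          (fun x => decide (aCnt x rows 1 1 = ((first :: rows).length : Int))) := by
  unfold solution
  have h0 : PySem.List.pyGet? (first :: rows) 0 = some first := by
    simp [PySem.List.pyGet?, PySem.List.pyIdx?]
  rw [h0]
  have h2 : ∀ d, (PySem.List.pyRange 1 (((first :: rows).length : Nat) : Int) 1).foldl
      (aOuter (first :: rows)) d = outerRec rows 1 d := fun d => by
    simpa using outer_to_rec (first :: rows) 1 d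
  simp only [Option.getD_some, h2]
  set C := outerRec rows 1 (first.foldl (fun d item => d.insert item 1)
    (PySem.Dict.empty : PySem.Dict Int Int)) with hC
  have hkeys : C.keys = PySem.List.dedup first := by
    rw [hC, outerRec_keys, PySem.Dict.keys_foldl_insert, PySem.Dict.keys_empty,
      PySem.List.dedup_eq_ofList]
    rfl
  have hget : ∀ x, x ∈ first → C.get? x = some (aCnt x rows 1 1) := by
    intro x hxf
    rw [hC, outerRec_get?, get?_foldl_insert_one, PySem.Dict.get?_empty, if_pos hxf]
    rfl
  rw [hkeys, PySem.List.foldl_append_ite_eq_filter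
    (fun key => (C.get? key).getD 0 = (((first :: rows).length : Nat) : Int)), List.nil_append]
  apply List.filter_congr
  intro x hx
  have hxf : x ∈ first := (PySem.List.mem_dedup first x).mp hx
  rw [hget x hxf]
  simp

-- membership through B's running intersection
theorem mem_interFold (rows : List (List Int)) (c : PySem.Set Int) (x : Int) :
    x ∈ rows.foldl (fun c row => PySem.Set.inter c (PySem.Set.ofList row)) c
      ↔ x ∈ c ∧ ∀ row ∈ rows, x ∈ row := by
  induction rows generalizing c with
  | nil => simp
  | cons row rows ih =>
    rw [List.foldl_cons, ih]
    rw [PySem.Set.mem_inter, PySem.Set.mem_ofList]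
    simp only [List.mem_cons]
    constructor
    · rintro ⟨⟨hc, hr⟩, hall⟩
      exact ⟨hc, fun row' h => h.elim (fun e => e ▸ hr) (hall row')⟩
    · rintro ⟨hc, hall⟩
      exact ⟨⟨hc, hall row (Or.inl rfl)⟩, fun row' h => hall row' (Or.inr h)⟩

-- characterisation of B on a nonempty matrix
theorem alt_eq_filter (first : List Int) (rows : List (List Int)) :
    solution_alt (first :: rows)
      = (PySem.List.dedup first).filter (fun x => decide (∀ row ∈ rows, x ∈ row)) := by
  unfold solution_alt
  have h0 : PySem.List.pyGet? (first :: rows) 0 = some first := by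
    simp [PySem.List.pyGet?, PySem.List.pyIdx?]
  rw [h0]
  simp only [Option.getD_some, PySem.List.slice_from_one, List.tail_cons]
  apply List.filter_congr
  intro x hx
  have hxf : x ∈ first := (PySem.List.mem_dedup first x).mp hx
  by_cases hall : ∀ row ∈ rows, x ∈ row
  · have hmem : x ∈ rows.foldl (fun c row => PySem.Set.inter c (PySem.Set.ofList row))
        (PySem.Set.ofList first) :=
      (mem_interFold rows _ x).mpr ⟨(PySem.Set.mem_ofList first x).mpr hxf, hall⟩
    rw [(PySem.Set.contains_iff _ x).mpr hmem]
    simpa using hall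
  · cases hcb : PySem.Set.contains (rows.foldl (fun c row => PySem.Set.inter c (PySem.Set.ofList row))
        (PySem.Set.ofList first)) x with
    | true =>
      exact absurd ((mem_interFold rows _ x).mp ((PySem.Set.contains_iff _ x).mp hcb)).2 hall
    | false => simp [hall]

-- ===== VERDICT (by name: the statement is the Claim_ definition above) =====
theorem solution_spec : Claim_unchanged_solution := by
  intro matrix hdom hpre hnd
  cases matrix with
  | nil => exact absurd rfl hpre
  | cons first rows =>
    rw [solution_eq_filter, alt_eq_filter]
    apply List.filter_congr
    intro x hx
    have hxf : x ∈ first := (PySem.List.mem_dedup first x).mp hx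
    have hiff : aCnt x rows 1 1 = (((first :: rows).length : Nat) : Int)
        ↔ ∀ row ∈ rows, x ∈ row := by
      by_contra hbad
      exact hnd ⟨x, by simpa using hxf, by simpa using hbad⟩
    exact decide_eq_decide.mpr hiff

theorem solution_changed : Claim_changed_solution := by
  unfold Claim_changed_solution; decide

theorem solution_tight : Claim_exact_solution := by
  intro matrix hdom hpre hD heq
  cases matrix with
  | nil => exact absurd rfl hpre
  | cons first rows =>
    obtain ⟨x, hxm, hne⟩ := hD
    have hxf : x ∈ first := by simpa using hxm
    rw [solution_eq_filter, alt_eq_filter] at heq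
    have hxd : x ∈ PySem.List.dedup first := (PySem.List.mem_dedup first x).mpr hxf
    have h1 : (aCnt x rows 1 1 = (((first :: rows).length : Nat) : Int))
        ↔ (∀ row ∈ rows, x ∈ row) := by
      constructor
      · intro hc
        have hm : x ∈ (PySem.List.dedup first).filter
            (fun x => decide (∀ row ∈ rows, x ∈ row)) :=
          heq ▸ (List.mem_filter.mpr ⟨hxd, by simpa using hc⟩)
        simpa using (List.mem_filter.mp hm).2
      · intro hall
        have hm : x ∈ (PySem.List.dedup first).filter
            (fun x => decide (aCnt x rows 1 1 = (((first :: rows).length : Nat) : Int))) :=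
          heq.symm ▸ (List.mem_filter.mpr ⟨hxd, by simpa using hall⟩)
        simpa using (List.mem_filter.mp hm).2
    exact hne (by simpa using h1)
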